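-- pv_equiv track=rewrite | github.com/vbshuliar/Programming_Projects_and_Labs_from_Ukrainian_Catholic_University | 01/programming/labs/03_functions/01/lab4_task_1.py | number_of_capital_letters
-- ===== SOURCE A (Python) =====
-- def number_of_capital_letters(s):
--     '''
--     str -> str
--     Find and return number of capital letters in string. If argument isn't string
--     function should return None.
--
--     >>> number_of_capital_letters('ArithmeticError')
--     2
--     >>> number_of_occurence('EOFError')
--     4
--     >>> number_of_capital_letters(1)
--     None
--     '''
--     eng = "ABCDEFGHIJKLMNOPQRSTUVWXYZ"
--     if type(s) is not str:
--         return None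
--     counter = 0
--     for i in s:
--         if i in eng:
--             counter += 1
--     return counter
-- ===== SOURCE B (Python) =====
-- def number_of_capital_letters(s):
--     '''Count ASCII capital letters by looping over the alphabet and summing
--     per-letter occurrence counts, instead of scanning the string testing each char.'''
--     if type(s) is not str:
--         return None
--     return sum(s.count(c) for c in "ABCDEFGHIJKLMNOPQRSTUVWXYZ")
-- ===== Notes on version B (the rewrite author's own statement) =====
-- stated objective: alternative
-- what changed: B inverts the traversal: instead of scanning the string once testing each character for membership in the alphabet, it loops over the 26 uppercase letters and sums str.count of each letter in the string.
import Mathlib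
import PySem

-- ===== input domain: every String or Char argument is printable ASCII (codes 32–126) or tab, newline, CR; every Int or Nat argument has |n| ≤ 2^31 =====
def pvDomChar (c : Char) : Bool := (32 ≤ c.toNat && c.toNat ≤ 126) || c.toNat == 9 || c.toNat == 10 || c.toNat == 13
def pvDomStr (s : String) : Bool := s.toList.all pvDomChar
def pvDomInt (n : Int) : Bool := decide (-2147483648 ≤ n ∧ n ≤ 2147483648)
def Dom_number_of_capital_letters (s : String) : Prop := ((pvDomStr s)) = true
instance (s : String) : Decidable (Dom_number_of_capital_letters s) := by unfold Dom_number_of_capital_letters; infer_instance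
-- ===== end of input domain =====

-- B loops over the 26-letter alphabet and sums per-letter occurrence counts instead of
-- scanning the string once testing membership; objective: alternative decomposition.
-- (Under the String signature the Python `type(s) is not str → None` guard never fires;
-- both ports therefore always return `some`.)

-- ===== PORT A =====
-- A scans the string, incrementing a counter when the character occurs in the alphabet
-- (`i in eng` is Python substring membership, ported as PySem.Chars.isIn).
def number_of_capital_letters (s : String) : Option Int :=
  let eng : List Char := "ABCDEFGHIJKLMNOPQRSTUVWXYZ".toList
  let counter : Int :=
    s.toList.foldl (fun counter i => if PySem.Chars.isIn [i] eng then counter + 1 else counter) 0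
  some counter

-- ===== PORT B =====
-- B: sum(s.count(c) for c in "ABCDEFGHIJKLMNOPQRSTUVWXYZ")
def number_of_capital_letters_alt (s : String) : Option Int :=
  some ((("ABCDEFGHIJKLMNOPQRSTUVWXYZ".toList).map
    (fun c => ((PySem.Str.count s (String.singleton c) : Nat) : Int))).sum)

-- ===== PRECONDITION & SPEC =====
def Spec_number_of_capital_letters (s : String) (out : Option Int) : Prop := out = number_of_capital_letters_alt s
instance (s : String) (out : Option Int) : Decidable (Spec_number_of_capital_letters s out) := by unfold Spec_number_of_capital_letters; infer_instance

-- ===== CLAIM (what is proved, stated in full; the proofs are below) =====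
def Claim_equal_number_of_capital_letters : Prop := ∀ (s : String), Dom_number_of_capital_letters s → Spec_number_of_capital_letters s (number_of_capital_letters s)

-- ===== LEMMAS AND PROOFS =====

-- Chars.count with a single-character needle is plain element count.
theorem pv_count_go_single (c : Char) : ∀ (l : List Char) (fuel acc : Nat), l.length ≤ fuel →
    PySem.Chars.count.go [c] fuel l acc = acc + l.count c := by
  intro l
  induction l with
  | nil => intro fuel acc h; cases fuel <;> simp [PySem.Chars.count.go]
  | cons x t ih =>
    intro fuel acc h
    match fuel with
    | 0 => simp at h
    | Nat.succ f =>
      simp at h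
      by_cases hx : x = c
      · subst hx
        simp [PySem.Chars.count.go, List.isPrefixOf, ih f (acc + 1) h]
        omega
      · simp [PySem.Chars.count.go, List.isPrefixOf, hx, ih f acc h, Ne.symm hx]

theorem pv_count_single (l : List Char) (c : Char) : PySem.Chars.count l [c] = l.count c := by
  simp [PySem.Chars.count, pv_count_go_single c l l.length 0 le_rfl]

theorem pv_countP_cons_mem (l : List Char) (c : Char) (L : List Char) (hc : c ∉ L) :
    l.countP (fun i => decide (i = c) || decide (i ∈ L)) = l.count c + l.countP (fun i => decide (i ∈ L)) := by
  induction l with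
  | nil => simp
  | cons x t ih =>
    by_cases hx : x = c
    · subst hx; simp [ih, hc]; omega
    · simp [List.countP_cons, hx, ih]
      by_cases hm : x ∈ L
      · simp [hm]
        omega
      · simp [hm]

-- Summing per-letter counts over a duplicate-free letter list is counting membership.
theorem pv_sum_count_eq (l : List Char) : ∀ (L : List Char), L.Nodup →
    ((L.map fun c => ((l.count c : Nat) : Int)).sum = ((l.countP (fun i => decide (i ∈ L)) : Nat) : Int)) := by
  intro L
  induction L with
  | nil => simp
  | cons c L ih =>
    intro h
    simp at h
    simp [ih h.2]
    rw [pv_countP_cons_mem l c L h.1]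
    push_cast
    ring

-- ===== VERDICT (by name: the statement is the Claim_ definition above) =====
theorem number_of_capital_letters_spec : Claim_equal_number_of_capital_letters := by
  intro s _
  unfold Spec_number_of_capital_letters number_of_capital_letters number_of_capital_letters_alt
  simp only [PySem.Str.count_eq, String.toList_singleton, pv_count_single]
  rw [pv_sum_count_eq s.toList _ (by decide)]
  rw [PySem.List.foldl_if_add_one (fun i => PySem.Chars.isIn [i] "ABCDEFGHIJKLMNOPQRSTUVWXYZ".toList) s.toList 0]
  have h : List.countP (fun i => PySem.Chars.isIn [i] "ABCDEFGHIJKLMNOPQRSTUVWXYZ".toList) s.toList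
      = List.countP (fun i => decide (i ∈ "ABCDEFGHIJKLMNOPQRSTUVWXYZ".toList)) s.toList :=
    List.countP_congr (fun i _ => by simp [PySem.Chars.isIn_iff_infix, List.singleton_infix_iff])
  rw [h, zero_add]
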